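-- pv_equiv track=rewrite | github.com/roomanidzee/ml-basics | src/hw/one/matrix_ops.py | stupid_transformation
-- ===== SOURCE A (Python) =====
-- def stupid_transformation(X, a=1):
--
--     Y = list(reversed(X))
--
--     for index, elem in enumerate(X):
--         if index % 2 != 0:
--             Y[index] = elem
--
--     for index, elem in enumerate(Y):
--         if index % 2 != 0:
--             Y[index] = a
--
--         if index % 2 == 0:
--             Y[index] = elem ** 3
--
--     final_arr = X + Y
--     return list(reversed(final_arr))
-- ===== SOURCE B (Python) =====
-- def stupid_transformation(X, a=1):
--     # Build the result front-to-back directly: the reversal of X+Y is pushed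
--     # into the index arithmetic, so no reversed copy of Y is ever made.
--     n = len(X)
--     out = []
--     for j, x in enumerate(X):
--         out.append(x ** 3 if (n - 1 - j) % 2 == 0 else a)
--     out.extend(reversed(X))
--     return out
-- ===== Notes on version B (the rewrite author's own statement) =====
-- stated objective: simpler
-- what changed: Instead of building Y by three mutating passes and reversing the concatenation X+Y at the end, B pushes the final reversal into the index arithmetic and emits the result front-to-back in one accumulator loop (out[j] = X[j]**3 when (n-1-j) is even, else a) followed by appending reversed(X); no intermediate Y list and no final reversal exist.
import Mathlib
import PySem

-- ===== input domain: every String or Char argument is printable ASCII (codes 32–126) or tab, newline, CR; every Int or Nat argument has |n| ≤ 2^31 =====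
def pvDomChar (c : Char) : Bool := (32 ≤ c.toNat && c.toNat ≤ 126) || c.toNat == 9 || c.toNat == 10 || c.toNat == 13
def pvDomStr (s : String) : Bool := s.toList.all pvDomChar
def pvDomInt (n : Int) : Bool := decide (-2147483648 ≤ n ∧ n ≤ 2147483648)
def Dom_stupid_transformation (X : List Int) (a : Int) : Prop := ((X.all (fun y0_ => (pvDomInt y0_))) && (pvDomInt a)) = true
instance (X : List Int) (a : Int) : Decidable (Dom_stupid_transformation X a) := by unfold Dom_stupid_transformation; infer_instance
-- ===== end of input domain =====

-- B builds the output front-to-back in one accumulator loop (the final reversal is pushed into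
-- the index arithmetic) and appends reversed X; no intermediate Y list, no final reversal. Simpler, same O(n).

-- ===== PORT A =====
-- body of A's second loop ('for index, elem in enumerate(Y)'), iterated by index with live reads
def pvStep2 (a : Int) (Y : List Int) (i : Int) : List Int :=
  let elem := PySem.List.pyGetD Y i 0
  let Y1 := if PySem.Int.mod i 2 ≠ 0 then PySem.List.pySetD Y i a else Y
  if PySem.Int.mod i 2 = 0 then PySem.List.pySetD Y1 i (elem ^ 3) else Y1

def stupid_transformation (X : List Int) (a : Int) : List Int :=
  let Y0 := X.reverse
  -- for index, elem in enumerate(X): if index % 2 != 0: Y[index] = elem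
  let Y1 := (PySem.List.enumerate X).foldl
    (fun Y p => if PySem.Int.mod p.1 2 ≠ 0 then PySem.List.pySetD Y p.1 p.2 else Y) Y0
  -- for index, elem in enumerate(Y): … (reads Y live; only index `index` is written each step)
  let Y2 := (PySem.List.pyRange 0 (Y1.length : Int) 1).foldl (pvStep2 a) Y1
  (X ++ Y2).reverse

-- ===== PORT B =====
def stupid_transformation_alt (X : List Int) (a : Int) : List Int :=
  let n := X.length
  -- out.append(x ** 3 if (n - 1 - j) % 2 == 0 else a)  for j, x in enumerate(X)
  let out := (PySem.List.enumerate X).foldl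
    (fun out p => out ++ [if PySem.Int.mod ((n : Int) - 1 - p.1) 2 = 0 then p.2 ^ 3 else a]) []
  -- out.extend(reversed(X))
  out ++ X.reverse

-- ===== PRECONDITION & SPEC =====
def Spec_stupid_transformation (X : List Int) (a : Int) (out : List Int) : Prop := out = stupid_transformation_alt X a
instance (X : List Int) (a : Int) (out : List Int) : Decidable (Spec_stupid_transformation X a out) := by unfold Spec_stupid_transformation; infer_instance

-- ===== CLAIM (what is proved, stated in full; the proofs are below) =====
def Claim_equal_stupid_transformation : Prop := ∀ (X : List Int) (a : Int), Dom_stupid_transformation X a → Spec_stupid_transformation X a (stupid_transformation X a)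

-- ===== LEMMAS AND PROOFS =====

theorem pvStep2_eq_set (a : Int) (W : List Int) (k : Nat) :
    pvStep2 a W (k : Int) = W.set k (if k % 2 = 1 then a else (W.getD k 0) ^ 3) := by
  have hm : PySem.Int.mod (k : Int) 2 = ((k % 2 : Nat) : Int) := by
    exact_mod_cast PySem.Int.mod_natCast k 2
  rcases Nat.mod_two_eq_zero_or_one k with h | h
  · simp only [pvStep2, hm, h, PySem.List.pyGetD_natCast, PySem.List.pySetD_natCast]
    norm_num
  · simp only [pvStep2, hm, h, PySem.List.pyGetD_natCast, PySem.List.pySetD_natCast]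
    norm_num

theorem loop2_char (a : Int) : ∀ (m k : Nat) (W : List Int), k + m ≤ W.length →
    ((List.range' k m).foldl (fun Y (i : Nat) => pvStep2 a Y (i : Int)) W).length = W.length ∧
    ∀ j, ((List.range' k m).foldl (fun Y (i : Nat) => pvStep2 a Y (i : Int)) W)[j]? =
      if k ≤ j ∧ j < k + m then some (if j % 2 = 1 then a else (W.getD j 0) ^ 3) else W[j]? := by
  intro m
  induction m with
  | zero =>
    intro k W _
    refine ⟨rfl, fun j => ?_⟩
    rw [if_neg (by omega)]
    rfl
  | succ m ih =>
    intro k W hW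
    rw [List.range'_succ]
    simp only [List.foldl_cons]
    rw [pvStep2_eq_set a W k]
    obtain ⟨ihlen, ihget⟩ := ih (k + 1)
      (W.set k (if k % 2 = 1 then a else (W.getD k 0) ^ 3)) (by simp; omega)
    refine ⟨by rw [ihlen, List.length_set], fun j => ?_⟩
    rw [ihget j]
    by_cases h1 : k + 1 ≤ j ∧ j < k + 1 + m
    · rw [if_pos h1, if_pos (by omega : k ≤ j ∧ j < k + (m + 1))]
      have hgd : (W.set k (if k % 2 = 1 then a else (W.getD k 0) ^ 3)).getD j 0 = W.getD j 0 := by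
        rw [List.getD_eq_getElem?_getD, List.getElem?_set, if_neg (by omega),
          ← List.getD_eq_getElem?_getD]
      rw [hgd]
    · rw [if_neg h1, List.getElem?_set]
      by_cases hjk : k = j
      · subst hjk
        rw [if_pos rfl, if_pos (by omega), if_pos (by omega : k ≤ k ∧ k < k + (m + 1))]
      · rw [if_neg hjk, if_neg (by omega)]

theorem loop1_char : ∀ (ps : List (Int × Int)), (∀ p ∈ ps, ∃ k : Nat, p.1 = (k : Int)) →
    ∀ (W : List Int),
    ((ps.foldl (fun Y p => if PySem.Int.mod p.1 2 ≠ 0 then PySem.List.pySetD Y p.1 p.2 else Y) W).length = W.length) ∧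
    ∀ j : Nat, j % 2 = 0 →
      (ps.foldl (fun Y p => if PySem.Int.mod p.1 2 ≠ 0 then PySem.List.pySetD Y p.1 p.2 else Y) W)[j]? = W[j]? := by
  intro ps
  induction ps with
  | nil => exact fun _ W => ⟨rfl, fun _ _ => rfl⟩
  | cons p ps ih =>
    intro hps W
    obtain ⟨k, hk⟩ := hps p (List.mem_cons_self)
    simp only [List.foldl_cons]
    have hmod : PySem.Int.mod p.1 2 = ((k % 2 : Nat) : Int) := by
      rw [hk]; exact_mod_cast PySem.Int.mod_natCast k 2
    rcases Nat.mod_two_eq_zero_or_one k with h | h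
    · have hW1 : (if PySem.Int.mod p.1 2 ≠ 0 then PySem.List.pySetD W p.1 p.2 else W) = W := by
        rw [hmod, h]; simp
      rw [hW1]
      exact ih (fun q hq => hps q (List.mem_cons_of_mem _ hq)) W
    · have hW1 : (if PySem.Int.mod p.1 2 ≠ 0 then PySem.List.pySetD W p.1 p.2 else W)
          = W.set k p.2 := by
        rw [hmod, h, hk]
        simp
      rw [hW1]
      obtain ⟨ih1, ih2⟩ := ih (fun q hq => hps q (List.mem_cons_of_mem _ hq)) (W.set k p.2)
      refine ⟨by rw [ih1, List.length_set], fun j hj => ?_⟩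
      have hkj : k ≠ j := by omega
      rw [ih2 j hj, List.getElem?_set, if_neg hkj]

theorem main_eq (X : List Int) (a : Int) : stupid_transformation X a = stupid_transformation_alt X a := by
  unfold stupid_transformation stupid_transformation_alt
  simp only []
  set n := X.length with hn
  set Y0 := X.reverse with hY0
  set Y1 := (PySem.List.enumerate X).foldl
    (fun Y p => if PySem.Int.mod p.1 2 ≠ 0 then PySem.List.pySetD Y p.1 p.2 else Y) Y0 with hY1
  have hEnum : ∀ p ∈ PySem.List.enumerate X 0, ∃ k : Nat, p.1 = (k : Int) := by
    intro p hp
    rw [PySem.List.mem_enumerate_iff] at hp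
    obtain ⟨k, hk, rfl⟩ := hp
    exact ⟨k, by push_cast; ring⟩
  obtain ⟨h1len, h1get⟩ := loop1_char (PySem.List.enumerate X) hEnum Y0
  rw [← hY1] at h1len h1get
  have hY1len : Y1.length = n := by rw [h1len, hY0, List.length_reverse]
  -- B side: the accumulator loop is a map over enumerate X
  rw [PySem.List.foldl_append_singleton_eq_map, List.nil_append]
  -- A side: turn the pyRange fold into a Nat-indexed range' fold
  rw [PySem.List.pyRange_one, List.foldl_map]
  simp only [Int.sub_zero, Int.toNat_natCast, zero_add, List.range_eq_range']
  obtain ⟨h2len, h2get⟩ := loop2_char a Y1.length 0 Y1 (by omega)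
  rw [hY1len] at h2len h2get
  rw [show List.range' 0 Y1.length = List.range' 0 n from by rw [hY1len]]
  rw [List.reverse_append]
  congr 1
  apply List.ext_getElem?
  intro j
  by_cases hj : j < n
  · have hidx : n - 1 - j < Y1.length := by omega
    rw [List.getElem?_reverse (by rw [h2len]; omega), h2len]
    rw [h2get (n - 1 - j), if_pos ⟨Nat.zero_le _, by omega⟩]
    rw [List.getElem?_map, PySem.List.getElem?_enumerate]
    rw [List.getElem?_eq_getElem (by omega : j < X.length)]
    simp only [Option.map_some]
    have hcast : ((n : Int) - 1 - ((0 : Int) + (j : Int))) = ((n - 1 - j : Nat) : Int) := by omega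
    have hmod : PySem.Int.mod ((n : Int) - 1 - ((0 : Int) + (j : Int))) 2
        = (((n - 1 - j) % 2 : Nat) : Int) := by
      rw [hcast]; exact_mod_cast PySem.Int.mod_natCast (n - 1 - j) 2
    rcases Nat.mod_two_eq_zero_or_one (n - 1 - j) with h | h
    · rw [hmod, h]
      simp only [Int.natCast_zero, ite_true]
      congr 2
      · -- Y1 at the even index n-1-j is untouched by loop 1, so it is Y0 = X.reverse there
        rw [List.getD_eq_getElem?_getD, h1get (n - 1 - j) h, hY0,
          List.getElem?_reverse (by omega : n - 1 - j < X.length)]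
        have hidx2 : X.length - 1 - (n - 1 - j) = j := by omega
        rw [hidx2, List.getElem?_eq_getElem (by omega : j < X.length)]
        simp only [Option.getD_some]
        norm_num
    · rw [hmod, h]
      norm_num
  · rw [List.getElem?_eq_none (by rw [List.length_reverse, h2len]; omega), eq_comm]
    apply List.getElem?_eq_none
    rw [List.length_map, PySem.List.length_enumerate]
    omega

-- ===== VERDICT (by name: the statement is the Claim_ definition above) =====
theorem stupid_transformation_spec : Claim_equal_stupid_transformation := by
  intro X a _
  unfold Spec_stupid_transformation
  exact main_eq X a
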